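-- pv_equiv track=rewrite | github.com/TyrAEL-09/iincrediword | LexicoGrama/lexigrama.py | _calcular_complejidad_camino
-- ===== SOURCE A (Python) =====
-- from typing import List, Tuple, Set, Optional, Dict # Added Dict
--
-- def _calcular_complejidad_camino(camino: List[Tuple[int, int]]) -> int:
--     if len(camino) < 3: return 0
--     cambios_direccion = 0
--     for i in range(1, len(camino) - 1):
--         dir1 = (camino[i][0] - camino[i-1][0], camino[i][1] - camino[i-1][1])
--         dir2 = (camino[i+1][0] - camino[i][0], camino[i+1][1] - camino[i][1])
--         if dir1 != dir2:
--             cambios_direccion += 1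
--     return cambios_direccion
-- ===== SOURCE B (Python) =====
-- def _calcular_complejidad_camino(camino):
--     # Run-length grouping: count maximal runs of equal step vectors; answer = runs - 1.
--     dirs = [(b[0] - a[0], b[1] - a[1]) for a, b in zip(camino, camino[1:])]
--     groups = 0
--     i = 0
--     n = len(dirs)
--     while i < n:
--         groups += 1
--         while i + 1 < n and dirs[i + 1] == dirs[i]:
--             i += 1
--         i += 1
--     return max(groups - 1, 0)
-- ===== Notes on version B (the rewrite author's own statement) =====
-- stated objective: alternative
-- what changed: Replaces A's fused pairwise window comparison by run-length grouping: build the list of step vectors, count its maximal runs of equal vectors with a run-skipping while loop, and return runs-1 (clamped at 0).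
import Mathlib
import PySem

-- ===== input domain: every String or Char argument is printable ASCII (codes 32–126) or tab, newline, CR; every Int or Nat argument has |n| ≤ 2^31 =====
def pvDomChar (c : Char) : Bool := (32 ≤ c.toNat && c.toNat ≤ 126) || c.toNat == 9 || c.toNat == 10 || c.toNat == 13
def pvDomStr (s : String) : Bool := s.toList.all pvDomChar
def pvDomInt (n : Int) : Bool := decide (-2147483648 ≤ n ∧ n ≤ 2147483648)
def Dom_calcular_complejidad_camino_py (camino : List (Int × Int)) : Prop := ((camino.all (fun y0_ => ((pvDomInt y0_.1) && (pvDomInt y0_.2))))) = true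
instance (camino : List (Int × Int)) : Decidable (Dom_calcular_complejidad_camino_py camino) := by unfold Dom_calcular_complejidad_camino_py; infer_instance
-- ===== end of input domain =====

-- B replaces A's fused pairwise-window comparison by run-length grouping of the step vectors (count maximal runs, return runs-1 clamped at 0); objective: alternative.

-- ===== PORT A =====
-- literal transliteration of A's index loop over range(1, len-1)
def calcular_complejidad_camino_py (camino : List (Int × Int)) : Int :=
  if camino.length < 3 then 0
  else
    (PySem.List.pyRange 1 ((camino.length : Int) - 1) 1).foldl
      (fun acc i =>
        let pm := PySem.List.pyGetD camino (i - 1) (0, 0)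
        let pc := PySem.List.pyGetD camino i (0, 0)
        let pn := PySem.List.pyGetD camino (i + 1) (0, 0)
        let dir1 : Int × Int := (pc.1 - pm.1, pc.2 - pm.2)
        let dir2 : Int × Int := (pn.1 - pc.1, pn.2 - pc.2)
        if dir1 ≠ dir2 then acc + 1 else acc) 0

-- ===== PORT B =====
-- inner while loop: 'while i + 1 < n and dirs[i+1] == dirs[i]: i += 1' (fuel = totality guard only)
def pvSkipB (dirs : List (Int × Int)) : Nat → Int → Int
  | 0, i => i
  | fuel + 1, i =>
      if i + 1 < (dirs.length : Int) ∧
          PySem.List.pyGetD dirs (i + 1) (0, 0) = PySem.List.pyGetD dirs i (0, 0) then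
        pvSkipB dirs fuel (i + 1)
      else i

-- outer while loop: 'while i < n: groups += 1; <inner skip>; i += 1' (fuel = totality guard only)
def pvOuterB (dirs : List (Int × Int)) : Nat → Int → Int → Int
  | 0, _, groups => groups
  | fuel + 1, i, groups =>
      if i < (dirs.length : Int) then
        pvOuterB dirs fuel (pvSkipB dirs dirs.length i + 1) (groups + 1)
      else groups

-- dirs = [(b0-a0, b1-a1) for a, b in zip(camino, camino[1:])]; then run-count via the while loops
def calcular_complejidad_camino_py_alt (camino : List (Int × Int)) : Int :=
  let dirs := (camino.zip camino.tail).map (fun ab => (ab.2.1 - ab.1.1, ab.2.2 - ab.1.2))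
  max (pvOuterB dirs (dirs.length + 1) 0 0 - 1) 0

-- ===== PRECONDITION & SPEC =====
def Spec_calcular_complejidad_camino_py (camino : List (Int × Int)) (out : Int) : Prop := out = calcular_complejidad_camino_py_alt camino
instance (camino : List (Int × Int)) (out : Int) : Decidable (Spec_calcular_complejidad_camino_py camino out) := by unfold Spec_calcular_complejidad_camino_py; infer_instance

-- ===== CLAIM (what is proved, stated in full; the proofs are below) =====
def Claim_equal_calcular_complejidad_camino_py : Prop := ∀ (camino : List (Int × Int)), Dom_calcular_complejidad_camino_py camino → Spec_calcular_complejidad_camino_py camino (calcular_complejidad_camino_py camino)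

-- ===== LEMMAS AND PROOFS =====

-- proof-side reference function: structural 3-window count of direction changes
def pvCnt : List (Int × Int) → Int
  | a :: b :: c :: t =>
      (if ((b.1 - a.1, b.2 - a.2) : Int × Int) ≠ (c.1 - b.1, c.2 - b.2) then 1 else 0)
        + pvCnt (b :: c :: t)
  | _ => 0

-- number of adjacent unequal pairs in a list (transitions)
def pvT : List (Int × Int) → Int
  | d :: e :: t => (if d ≠ e then 1 else 0) + pvT (e :: t)
  | _ => 0

-- number of maximal runs of equal elements
def pvG : List (Int × Int) → Int
  | [] => 0
  | [_] => 1
  | d :: e :: t => (if d ≠ e then 1 else 0) + pvG (e :: t)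

def pvDirs (camino : List (Int × Int)) : List (Int × Int) :=
  (camino.zip camino.tail).map (fun ab => (ab.2.1 - ab.1.1, ab.2.2 - ab.1.2))

-- A's loop body, named for the lemmas
def pvStep (l : List (Int × Int)) (acc : Int) (i : Int) : Int :=
  let pm := PySem.List.pyGetD l (i - 1) (0, 0)
  let pc := PySem.List.pyGetD l i (0, 0)
  let pn := PySem.List.pyGetD l (i + 1) (0, 0)
  let dir1 : Int × Int := (pc.1 - pm.1, pc.2 - pm.2)
  let dir2 : Int × Int := (pn.1 - pc.1, pn.2 - pc.2)
  if dir1 ≠ dir2 then acc + 1 else acc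

lemma pvGetD_cons_shift (x : Int × Int) (xs : List (Int × Int)) (i : Int) (h : 1 ≤ i) :
    PySem.List.pyGetD (x :: xs) i (0, 0) = PySem.List.pyGetD xs (i - 1) (0, 0) := by
  rcases Int.le.dest h with ⟨k, hk⟩
  subst hk
  simp only [PySem.List.pyGetD, PySem.List.pyGet?, PySem.List.pyIdx?, List.length_cons,
    Nat.cast_add, Nat.cast_one, add_sub_cancel_left, Nat.cast_nonneg, Nat.cast_lt,
    Int.toNat_natCast]
  have h1 : (0:Int) ≤ 1 + k := by positivity
  rw [if_pos h1]
  by_cases h2 : (1:Int) + k ≤ xs.length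
  · have hk2 : k < xs.length := by omega
    have ht : ((1:Int) + k).toNat = k + 1 := by omega
    simp [h2, hk2, ht, Order.lt_add_one_iff]
  · have hk2 : ¬ (k < xs.length) := by omega
    simp [h2, hk2, Order.lt_add_one_iff]

lemma pvStep_cons_shift (x : Int × Int) (xs : List (Int × Int)) (acc i : Int) (h : 2 ≤ i) :
    pvStep (x :: xs) acc i = pvStep xs acc (i - 1) := by
  unfold pvStep
  rw [pvGetD_cons_shift x xs (i - 1) (by omega), pvGetD_cons_shift x xs i (by omega),
      pvGetD_cons_shift x xs (i + 1) (by omega)]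
  have e : i + 1 - 1 = i - 1 + 1 := by omega
  rw [e]

lemma pvFold_shift (x : Int × Int) (xs : List (Int × Int)) (m k acc : Int) (hm : 2 ≤ m) :
    (PySem.List.pyRange m k 1).foldl (pvStep (x :: xs)) acc
      = (PySem.List.pyRange (m - 1) (k - 1) 1).foldl (pvStep xs) acc := by
  by_cases h : k ≤ m
  · rw [PySem.List.pyRange_one_eq_nil h, PySem.List.pyRange_one_eq_nil (by omega)]
    rfl
  · have h' : m < k := by omega
    rw [PySem.List.pyRange_one_cons h',
        PySem.List.pyRange_one_cons (show m - 1 < k - 1 by omega)]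
    simp only [List.foldl_cons]
    rw [pvStep_cons_shift x xs acc m hm]
    have hr := pvFold_shift x xs (m + 1) k (pvStep xs acc (m - 1)) (by omega)
    have e1 : m + 1 - 1 = m - 1 + 1 := by omega
    rw [hr, e1]
termination_by (k - m).toNat
decreasing_by omega

lemma pvStep_one (a b c : Int × Int) (t : List (Int × Int)) (acc : Int) :
    pvStep (a :: b :: c :: t) acc 1 =
      if ((b.1 - a.1, b.2 - a.2) : Int × Int) ≠ (c.1 - b.1, c.2 - b.2) then acc + 1 else acc := by
  simp only [pvStep]
  rw [show (1 : Int) - 1 = 0 from by norm_num]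
  rw [PySem.List.pyGetD_zero_cons]
  rw [pvGetD_cons_shift a (b :: c :: t) 1 (by norm_num)]
  rw [show (1 : Int) - 1 = 0 from by norm_num, PySem.List.pyGetD_zero_cons]
  rw [pvGetD_cons_shift a (b :: c :: t) (1 + 1) (by norm_num)]
  rw [show (1 : Int) + 1 - 1 = 1 from by norm_num]
  rw [pvGetD_cons_shift b (c :: t) 1 (by norm_num)]
  rw [show (1 : Int) - 1 = 0 from by norm_num, PySem.List.pyGetD_zero_cons]

lemma pvLoop_eq_cnt : ∀ (t : List (Int × Int)) (a b c : Int × Int) (acc : Int),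
    (PySem.List.pyRange 1 (((a :: b :: c :: t).length : Int) - 1) 1).foldl
        (pvStep (a :: b :: c :: t)) acc
      = acc + pvCnt (a :: b :: c :: t) := by
  intro t
  induction t with
  | nil =>
      intro a b c acc
      have hr : PySem.List.pyRange 1 ((((a :: b :: c :: ([] : List (Int × Int))).length : Int)) - 1) 1 = [1] := by
        simp only [List.length_cons, List.length_nil]
        norm_num
        decide
      rw [hr]
      simp only [List.foldl_cons, List.foldl_nil]
      rw [pvStep_one]
      rw [pvCnt]
      split_ifs <;> simp [pvCnt]
  | cons d t ih =>
      intro a b c acc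
      have e : (((a :: b :: c :: d :: t).length : Int)) - 1
          = ((((b :: c :: d :: t).length : Int)) - 1) + 1 := by
        simp only [List.length_cons]; push_cast; ring
      rw [e]
      have h1 : (1 : Int) < ((((b :: c :: d :: t).length : Int)) - 1) + 1 := by
        simp only [List.length_cons]; push_cast; omega
      rw [PySem.List.pyRange_one_cons h1]
      simp only [List.foldl_cons]
      rw [show (1 : Int) + 1 = 2 from by norm_num]
      rw [pvFold_shift a (b :: c :: d :: t) 2 _ _ (by norm_num)]
      rw [show (2 : Int) - 1 = 1 from by norm_num]
      rw [show ((((b :: c :: d :: t).length : Int)) - 1) + 1 - 1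
          = (((b :: c :: d :: t).length : Int)) - 1 from by ring]
      rw [ih b c d _]
      rw [pvStep_one]
      conv_rhs => rw [pvCnt]
      split_ifs <;> ring

lemma pvCnt_short : ∀ (l : List (Int × Int)), l.length < 3 → pvCnt l = 0
  | [], _ => rfl
  | [_], _ => rfl
  | [_, _], _ => rfl
  | _ :: _ :: _ :: _, h => by simp only [List.length_cons] at h; omega

-- B-side loop lemmas (fuel versions)
lemma pvSkipB_ge (dirs : List (Int × Int)) : ∀ (fuel : Nat) (i : Int), i ≤ pvSkipB dirs fuel i := by
  intro fuel
  induction fuel with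
  | zero => intro i; exact le_refl i
  | succ f ih =>
      intro i
      rw [pvSkipB]
      split_ifs with h
      · have := ih (i + 1); omega
      · exact le_refl i

lemma pvSkipB_stable (dirs : List (Int × Int)) : ∀ (f1 f2 : Nat) (i : Int),
    ((dirs.length : Int) - (i + 1)).toNat ≤ f1 → ((dirs.length : Int) - (i + 1)).toNat ≤ f2 →
    pvSkipB dirs f1 i = pvSkipB dirs f2 i := by
  intro f1
  induction f1 with
  | zero =>
      intro f2 i h1 h2
      cases f2 with
      | zero => rfl
      | succ f2 =>
          rw [pvSkipB, pvSkipB, if_neg]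
          rintro ⟨hlt, -⟩
          omega
  | succ f1 ih =>
      intro f2 i h1 h2
      cases f2 with
      | zero =>
          rw [pvSkipB, pvSkipB, if_neg]
          rintro ⟨hlt, -⟩
          omega
      | succ f2 =>
          rw [pvSkipB, pvSkipB]
          by_cases h : i + 1 < (dirs.length : Int) ∧
              PySem.List.pyGetD dirs (i + 1) (0, 0) = PySem.List.pyGetD dirs i (0, 0)
          · rw [if_pos h, if_pos h]
            exact ih f2 (i + 1) (by omega) (by omega)
          · rw [if_neg h, if_neg h]

lemma pvSkipB_cons_shift (d : Int × Int) (t : List (Int × Int)) :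
    ∀ (fuel : Nat) (i : Int), 0 ≤ i →
    pvSkipB (d :: t) fuel (i + 1) = pvSkipB t fuel i + 1 := by
  intro fuel
  induction fuel with
  | zero => intro i _; rfl
  | succ f ih =>
      intro i hi
      have hl : ((d :: t).length : Int) = (t.length : Int) + 1 := by
        simp only [List.length_cons]; push_cast; ring
      have e1 : PySem.List.pyGetD (d :: t) (i + 1 + 1) (0, 0) = PySem.List.pyGetD t (i + 1) (0, 0) := by
        rw [pvGetD_cons_shift d t (i + 1 + 1) (by omega)]; congr 1; omega
      have e2 : PySem.List.pyGetD (d :: t) (i + 1) (0, 0) = PySem.List.pyGetD t i (0, 0) := by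
        rw [pvGetD_cons_shift d t (i + 1) (by omega)]; congr 1; omega
      rw [pvSkipB, pvSkipB]
      by_cases h : i + 1 < (t.length : Int) ∧
          PySem.List.pyGetD t (i + 1) (0, 0) = PySem.List.pyGetD t i (0, 0)
      · rw [if_pos h, if_pos (by rw [hl, e1, e2]; exact ⟨by omega, h.2⟩)]
        exact ih (i + 1) (by omega)
      · rw [if_neg h, if_neg (by rw [hl, e1, e2]; rintro ⟨hc1, hc2⟩; exact h ⟨by omega, hc2⟩)]

lemma pvOuterB_cons_shift (d : Int × Int) (t : List (Int × Int)) :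
    ∀ (fuel : Nat) (i g : Int), 0 ≤ i →
    pvOuterB (d :: t) fuel (i + 1) g = pvOuterB t fuel i g := by
  intro fuel
  induction fuel with
  | zero => intro i g _; rfl
  | succ f ih =>
      intro i g hi
      have hl : ((d :: t).length : Int) = (t.length : Int) + 1 := by
        simp only [List.length_cons]; push_cast; ring
      rw [pvOuterB, pvOuterB]
      by_cases h : i < (t.length : Int)
      · rw [if_pos h, if_pos (by rw [hl]; omega)]
        have hs : pvSkipB (d :: t) (d :: t).length (i + 1) = pvSkipB t t.length i + 1 := by
          rw [show (d :: t).length = t.length + 1 from by simp]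
          rw [pvSkipB_cons_shift d t (t.length + 1) i hi]
          rw [pvSkipB_stable t (t.length + 1) t.length i (by omega) (by omega)]
        rw [hs]
        have hge := pvSkipB_ge t t.length i
        exact ih (pvSkipB t t.length i + 1) (g + 1) (by omega)
      · rw [if_neg h, if_neg (by rw [hl]; omega)]

lemma pvOuterB_nil (fuel : Nat) (i g : Int) (hi : 0 ≤ i) : pvOuterB [] fuel i g = g := by
  cases fuel with
  | zero => rfl
  | succ f =>
      rw [pvOuterB, if_neg]
      simp only [List.length_nil, Nat.cast_zero]
      omega

lemma pvOuterB_drop : ∀ (k : Nat) (t : List (Int × Int)) (fuel : Nat) (g : Int),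
    pvOuterB t fuel (k : Int) g = pvOuterB (t.drop k) fuel 0 g := by
  intro k
  induction k with
  | zero => intro t fuel g; simp
  | succ k ih =>
      intro t fuel g
      cases t with
      | nil =>
          rw [List.drop_nil, pvOuterB_nil fuel _ g (by positivity), pvOuterB_nil fuel 0 g le_rfl]
      | cons d t' =>
          rw [show ((k + 1 : Nat) : Int) = (k : Int) + 1 from by push_cast; ring]
          rw [pvOuterB_cons_shift d t' fuel (k : Int) g (by positivity)]
          rw [ih t' fuel g]
          rw [List.drop_succ_cons]

lemma pvSkipB_head (d e : Int × Int) (t : List (Int × Int)) :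
    pvSkipB (d :: e :: t) (d :: e :: t).length 0 =
      if e = d then pvSkipB (e :: t) (e :: t).length 0 + 1 else 0 := by
  have e1 : PySem.List.pyGetD (d :: e :: t) (0 + 1) (0, 0) = e := by
    rw [pvGetD_cons_shift d (e :: t) (0 + 1) (by norm_num)]
    norm_num [PySem.List.pyGetD_zero_cons]
  have e0 : PySem.List.pyGetD (d :: e :: t) 0 (0, 0) = d := PySem.List.pyGetD_zero_cons ..
  have hlen : (0 : Int) + 1 < ((d :: e :: t).length : Int) := by
    simp only [List.length_cons]; push_cast; omega
  rw [show (d :: e :: t).length = (e :: t).length + 1 from by simp]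
  rw [pvSkipB]
  by_cases hed : e = d
  · rw [if_pos ⟨hlen, by rw [e1, e0, hed]⟩, if_pos hed]
    have := pvSkipB_cons_shift d (e :: t) (e :: t).length 0 le_rfl
    rw [show (0 : Int) + 1 = 1 from by norm_num] at this
    exact this
  · rw [if_neg (by rw [e1, e0]; rintro ⟨-, hc⟩; exact hed hc), if_neg hed]

lemma pvSkipB_single (d : Int × Int) : pvSkipB [d] [d].length 0 = 0 := by
  rw [show [d].length = 0 + 1 from by simp]
  rw [pvSkipB, if_neg]
  rintro ⟨h1, -⟩
  simp only [List.length_cons, List.length_nil] at h1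
  omega

lemma pvG_run : ∀ (t : List (Int × Int)) (d : Int × Int),
    pvG (d :: t) = 1 + pvG (t.drop (pvSkipB (d :: t) (d :: t).length 0).toNat) := by
  intro t
  induction t with
  | nil => intro d; rw [pvSkipB_single]; simp [pvG]
  | cons e t' ih =>
      intro d
      rw [pvSkipB_head]
      by_cases hed : e = d
      · rw [if_pos hed]
        have hge := pvSkipB_ge (e :: t') (e :: t').length 0
        have ht : (pvSkipB (e :: t') (e :: t').length 0 + 1).toNat
            = (pvSkipB (e :: t') (e :: t').length 0).toNat + 1 := by omega
        rw [ht, List.drop_succ_cons]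
        have hgg : pvG (d :: e :: t') = pvG (e :: t') := by
          subst hed; rw [pvG]; simp
        rw [hgg, ih e]
      · rw [if_neg hed]
        simp only [Int.toNat_zero, List.drop_zero]
        rw [pvG]
        rw [if_pos (Ne.symm hed)]

lemma pvOuterB_eq_G : ∀ (n : Nat) (dirs : List (Int × Int)), dirs.length ≤ n →
    ∀ (fuel : Nat), dirs.length < fuel → ∀ (g : Int),
    pvOuterB dirs fuel 0 g = g + pvG dirs := by
  intro n
  induction n with
  | zero =>
      intro dirs h fuel hf g
      have hnil : dirs = [] := List.eq_nil_of_length_eq_zero (by omega)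
      subst hnil
      rw [pvOuterB_nil fuel 0 g le_rfl]
      simp [pvG]
  | succ n ih =>
      intro dirs h fuel hf g
      cases dirs with
      | nil =>
          rw [pvOuterB_nil fuel 0 g le_rfl]
          simp [pvG]
      | cons d t =>
          cases fuel with
          | zero => omega
          | succ f =>
              rw [pvOuterB]
              rw [if_pos (by exact_mod_cast Nat.succ_pos t.length)]
              have hge := pvSkipB_ge (d :: t) (d :: t).length 0
              have hs : pvSkipB (d :: t) (d :: t).length 0 + 1
                  = (((pvSkipB (d :: t) (d :: t).length 0).toNat + 1 : Nat) : Int) := by omega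
              rw [hs, pvOuterB_drop ((pvSkipB (d :: t) (d :: t).length 0).toNat + 1) (d :: t) f (g + 1)]
              rw [List.drop_succ_cons]
              have hlen : (t.drop (pvSkipB (d :: t) (d :: t).length 0).toNat).length ≤ n := by
                rw [List.length_drop]
                simp only [List.length_cons] at h
                omega
              have hfuel : (t.drop (pvSkipB (d :: t) (d :: t).length 0).toNat).length < f := by
                rw [List.length_drop]
                simp only [List.length_cons] at hf
                omega
              rw [ih _ hlen f hfuel (g + 1)]
              rw [pvG_run t d]
              ring

lemma pvT_nonneg : ∀ (l : List (Int × Int)), 0 ≤ pvT l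
  | [] => le_refl 0
  | [_] => le_refl 0
  | d :: e :: t => by
      rw [pvT]
      have := pvT_nonneg (e :: t)
      split_ifs <;> omega

lemma pvG_eq_T : ∀ (l : List (Int × Int)), l ≠ [] → pvG l = pvT l + 1
  | [], h => absurd rfl h
  | [_], _ => by simp [pvG, pvT]
  | d :: e :: t, _ => by
      rw [pvG, pvT, pvG_eq_T (e :: t) (by simp)]
      ring

lemma pvDirs_cons (a b : Int × Int) (t : List (Int × Int)) :
    pvDirs (a :: b :: t) = (b.1 - a.1, b.2 - a.2) :: pvDirs (b :: t) := by
  simp [pvDirs, List.zip_cons_cons]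

lemma pvT_dirs_eq_cnt : ∀ (l : List (Int × Int)), pvT (pvDirs l) = pvCnt l
  | [] => rfl
  | [_] => rfl
  | [_, _] => rfl
  | a :: b :: c :: t => by
      rw [pvDirs_cons, pvDirs_cons, pvT, pvCnt, ← pvDirs_cons,
          pvT_dirs_eq_cnt (b :: c :: t)]
termination_by l => l.length

lemma pvAlt_eq_cnt (l : List (Int × Int)) :
    calcular_complejidad_camino_py_alt l = pvCnt l := by
  show max (pvOuterB (pvDirs l) ((pvDirs l).length + 1) 0 0 - 1) 0 = pvCnt l
  rw [pvOuterB_eq_G (pvDirs l).length (pvDirs l) le_rfl ((pvDirs l).length + 1) (by omega) 0, zero_add]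
  rw [← pvT_dirs_eq_cnt l]
  by_cases h : pvDirs l = []
  · rw [h]; simp [pvG, pvT]
  · rw [pvG_eq_T _ h]
    have := pvT_nonneg (pvDirs l)
    omega

-- ===== VERDICT (by name: the statement is the Claim_ definition above) =====
theorem calcular_complejidad_camino_py_spec : Claim_equal_calcular_complejidad_camino_py := by
  intro camino _
  unfold Spec_calcular_complejidad_camino_py
  rw [pvAlt_eq_cnt]
  unfold calcular_complejidad_camino_py
  split_ifs with h
  · exact (pvCnt_short camino h).symm
  · match camino, h with
    | [], h => exact absurd (by simp) h
    | [_], h => exact absurd (by simp) h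
    | [_, _], h => exact absurd (by simp) h
    | a :: b :: c :: t, _ =>
        have hl := pvLoop_eq_cnt t a b c 0
        rw [zero_add] at hl
        exact hl
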